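-- pv_equiv track=rewrite | github.com/technekey/booking-tool | booking-tool.py | group_bookings
-- ===== SOURCE A (Python) =====
-- def group_bookings(bookings):
--     # Group bookings by lab name and date
--     groups = {}
--     for booking in bookings:
--         lab_date = booking['lab_name'] + '|' + booking['start_date_time'][:10]
--         if lab_date not in groups:
--             groups[lab_date] = []
--         groups[lab_date].append(booking)
--     return groups
-- ===== SOURCE B (Python) =====
-- def group_bookings(bookings):
--     # Group bookings by lab name and date: collect the distinct keys in first-
--     # occurrence order, then build each group by filtering the full list once per key.
--     def key(b):
--         return b['lab_name'] + '|' + b['start_date_time'][:10]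
--     order = list(dict.fromkeys(map(key, bookings)))
--     return {k: [b for b in bookings if key(b) == k] for k in order}
-- ===== Notes on version B (the rewrite author's own statement) =====
-- stated objective: alternative
-- what changed: B replaces A's single-pass bucket-appending dict loop with a two-phase plan: first dedupe the composite keys in first-occurrence order (dict.fromkeys), then build each group by a comprehension filtering the bookings list once per key.
import Mathlib
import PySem

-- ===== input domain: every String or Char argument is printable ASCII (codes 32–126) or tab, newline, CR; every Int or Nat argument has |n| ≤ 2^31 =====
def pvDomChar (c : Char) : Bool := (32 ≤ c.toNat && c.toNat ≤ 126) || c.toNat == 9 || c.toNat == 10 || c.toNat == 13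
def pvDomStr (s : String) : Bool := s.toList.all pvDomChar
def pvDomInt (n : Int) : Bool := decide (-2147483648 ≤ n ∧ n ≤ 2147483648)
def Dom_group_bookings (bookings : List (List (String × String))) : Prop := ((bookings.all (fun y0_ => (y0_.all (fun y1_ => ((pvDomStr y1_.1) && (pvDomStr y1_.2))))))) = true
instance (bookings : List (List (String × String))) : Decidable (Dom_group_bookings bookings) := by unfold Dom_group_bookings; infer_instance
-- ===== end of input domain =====

-- B groups by deduping the composite keys then filtering the list per key, instead of
-- A's one-pass bucket-appending dict loop; same return value (alternative decomposition).


-- ===== PORT A =====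
-- booking['lab_name'] + '|' + booking['start_date_time'][:10]; both Pythons compute this
-- exact key expression (Pre_ guarantees the keys are present, so getD's default never fires).
def pvKey (booking : List (String × String)) : String :=
  PySem.Dict.getD (PySem.Dict.mk booking) "lab_name" "" ++ "|" ++
    PySem.Str.slice (PySem.Dict.getD (PySem.Dict.mk booking) "start_date_time" "") none (some 10)

-- the loop body of A: setdefault-style insert of [] then in-place append
def pvStepA (groups : PySem.Dict String (List (List (String × String))))
    (booking : List (String × String)) : PySem.Dict String (List (List (String × String))) :=
  let lab_date := pvKey booking
  let groups1 := if groups.contains lab_date then groups else groups.insert lab_date []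
  groups1.modify lab_date [] (fun l => l ++ [booking])

def group_bookings (bookings : List (List (String × String))) : List (String × List (List (String × String))) :=
  (bookings.foldl pvStepA PySem.Dict.empty).items

-- ===== PORT B =====
-- list(dict.fromkeys(map(key, bookings))) then {k: [b for b in bookings if key(b) == k] for k in order}
def group_bookings_alt (bookings : List (List (String × String))) : List (String × List (List (String × String))) :=
  let order := PySem.List.dedup (bookings.map pvKey)
  order.map (fun k => (k, bookings.filter (fun b => pvKey b == k)))

-- ===== PRECONDITION & SPEC =====
-- Pre_ excludes exactly the bookings lacking a 'lab_name' or 'start_date_time' key, on which the Python A raises KeyError.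
def Pre_group_bookings (bookings : List (List (String × String))) : Prop :=
  (bookings.all (fun b => (PySem.Dict.mk b).contains "lab_name" && (PySem.Dict.mk b).contains "start_date_time")) = true
instance (bookings : List (List (String × String))) : Decidable (Pre_group_bookings bookings) := by unfold Pre_group_bookings; infer_instance
def pvWitness_group_bookings : (List (List (String × String))) :=
  [[("lab_name", "chem"), ("start_date_time", "2024-01-02T09:00")],
   [("lab_name", "chem"), ("start_date_time", "2024-01-02T11:00")],
   [("lab_name", "bio"), ("start_date_time", "2024-01-03T09:00")]]
def Spec_group_bookings (bookings : List (List (String × String))) (out : List (String × List (List (String × String)))) : Prop := out = group_bookings_alt bookings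
instance (bookings : List (List (String × String))) (out : List (String × List (List (String × String)))) : Decidable (Spec_group_bookings bookings out) := by unfold Spec_group_bookings; infer_instance

-- ===== CLAIM (what is proved, stated in full; the proofs are below) =====
def Claim_equal_group_bookings : Prop := ∀ (bookings : List (List (String × String))), Dom_group_bookings bookings → Pre_group_bookings bookings → Spec_group_bookings bookings (group_bookings bookings)

-- ===== LEMMAS AND PROOFS =====

-- A's loop body is a single modify-with-default (the 'if not in' branch only pre-seeds [])
theorem pvStepA_eq_modify (d : PySem.Dict String (List (List (String × String))))
    (b : List (String × String)) :
    pvStepA d b = d.modify (pvKey b) [] (fun l => l ++ [b]) := by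
  unfold pvStepA
  by_cases h : d.contains (pvKey b)
  · simp [h]
  · have h' : d.contains (pvKey b) = false := by simpa using h
    simp [h', PySem.Dict.modify, PySem.Dict.insert_insert_self,
      PySem.Dict.getD_of_not_contains d ([] : List (List (String × String))) h']

-- ===== VERDICT (by name: the statement is the Claim_ definition above) =====
theorem group_bookings_spec : Claim_equal_group_bookings := by
  intro bookings _ _
  show group_bookings bookings = group_bookings_alt bookings
  unfold group_bookings group_bookings_alt
  have hfold : bookings.foldl pvStepA PySem.Dict.empty
      = (bookings.map (fun b => (pvKey b, b))).foldl
          (fun d p => d.modify p.1 [] (fun l => l ++ [p.2])) PySem.Dict.empty := by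
    rw [List.foldl_map]
    exact PySem.List.foldl_congr_mem bookings _ _ _ (fun d b _ => pvStepA_eq_modify d b)
  rw [hfold]
  have hnodup : ((bookings.map (fun b => (pvKey b, b))).foldl
      (fun d p => d.modify p.1 [] (fun l => l ++ [p.2])) PySem.Dict.empty).keys.Nodup :=
    PySem.Dict.nodup_keys_foldl_modify_key (bookings.map (fun b => (pvKey b, b)))
      (fun p => p.1) [] (fun _ p l => l ++ [p.2]) PySem.Dict.empty
      (by simp [PySem.Dict.keys_empty])
  rw [PySem.Dict.items_eq_map_keys _ hnodup []]
  have hkeys : ((bookings.map (fun b => (pvKey b, b))).foldl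
      (fun d p => d.modify p.1 [] (fun l => l ++ [p.2])) PySem.Dict.empty).keys
      = PySem.List.dedup (bookings.map pvKey) := by
    rw [PySem.Dict.keys_foldl_modify_key (bookings.map (fun b => (pvKey b, b)))
      (fun p => p.1) [] (fun _ p l => l ++ [p.2])]
    simp [PySem.Dict.keys_empty, PySem.Set.update_nil_left, List.map_map,
      PySem.List.dedup_eq_ofList, Function.comp_def]
  rw [hkeys]
  refine List.map_congr_left (fun k _ => ?_)
  rw [PySem.Dict.getD_foldl_modify_append]
  simp [PySem.Dict.getD_empty, List.filter_map, List.map_map, Function.comp_def]
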